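-- pv_equiv track=rewrite | github.com/ark2016/VK-Technopark-project-2024 | data_mining/tests/functions/file_181_200.py | find_product_of_two_odd_numbers
-- ===== SOURCE A (Python) =====
-- def find_product_of_two_odd_numbers(lst):
--     result = []
--     for num in lst:
--         for i in range(1, num // 2 + 1, 2):
--             if num % i == 0 and (num // i) % 2 != 0:
--                 result.append(num)
--                 break
--     if not result:
--         return None
--     return result
-- ===== SOURCE B (Python) =====
-- def find_product_of_two_odd_numbers(lst):
--     result = [num for num in lst if num >= 3 and num % 2 == 1]
--     return result if result else None
-- ===== Notes on version B (the rewrite author's own statement) =====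
-- stated objective: faster
-- what changed: Replaced A's per-element trial-division loop over odd divisors (searching for an odd divisor with odd quotient, which succeeds exactly when the element is odd and >= 3) by a single O(1) parity-and-threshold filter per element.
import Mathlib
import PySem

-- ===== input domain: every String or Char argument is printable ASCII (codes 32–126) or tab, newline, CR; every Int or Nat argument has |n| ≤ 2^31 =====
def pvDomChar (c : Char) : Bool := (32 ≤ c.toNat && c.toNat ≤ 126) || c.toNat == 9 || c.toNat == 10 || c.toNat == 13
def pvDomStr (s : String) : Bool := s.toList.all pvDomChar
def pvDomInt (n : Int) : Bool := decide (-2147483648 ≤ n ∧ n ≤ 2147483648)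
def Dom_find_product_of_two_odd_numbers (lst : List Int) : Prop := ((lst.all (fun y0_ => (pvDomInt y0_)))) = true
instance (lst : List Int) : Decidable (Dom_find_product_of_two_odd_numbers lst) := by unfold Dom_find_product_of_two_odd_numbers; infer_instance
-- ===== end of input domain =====

-- B replaces A's trial-division search over odd divisors by a per-element O(1) parity/threshold filter (objective: faster).

-- ===== PORT A =====
-- inner 'for i in range(1, num//2+1, 2): if …: append; break' — iterates i = 1, 3, … while i < stop
-- (the range is iterated lazily, exactly as Python's range object is); returns whether the break fired
def pvInnerA (num i stop : Int) : Bool :=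
  if i < stop then
    (if PySem.Int.mod num i = 0 ∧ PySem.Int.mod (PySem.Int.floordiv num i) 2 ≠ 0 then true
     else pvInnerA num (i + 2) stop)
  else false
termination_by (stop - i).toNat
decreasing_by omega

def find_product_of_two_odd_numbers (lst : List Int) : Option (List Int) :=
  let result := lst.foldl (fun acc num =>
    if pvInnerA num 1 (PySem.Int.floordiv num 2 + 1) then acc ++ [num] else acc) []
  if result = [] then none else some result

-- ===== PORT B =====
def find_product_of_two_odd_numbers_alt (lst : List Int) : Option (List Int) :=
  let result := lst.filter (fun num => decide (3 ≤ num) && decide (PySem.Int.mod num 2 = 1))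
  if result = [] then none else some result

-- ===== PRECONDITION & SPEC =====
def Spec_find_product_of_two_odd_numbers (lst : List Int) (out : Option (List Int)) : Prop := out = find_product_of_two_odd_numbers_alt lst
instance (lst : List Int) (out : Option (List Int)) : Decidable (Spec_find_product_of_two_odd_numbers lst out) := by unfold Spec_find_product_of_two_odd_numbers; infer_instance

-- ===== CLAIM (what is proved, stated in full; the proofs are below) =====
def Claim_equal_find_product_of_two_odd_numbers : Prop := ∀ (lst : List Int), Dom_find_product_of_two_odd_numbers lst → Spec_find_product_of_two_odd_numbers lst (find_product_of_two_odd_numbers lst)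

-- ===== LEMMAS AND PROOFS =====

-- Python '%' and '//' with a positive divisor coincide with Lean's Int.emod / Int.ediv
theorem pv_mod_pos (a b : Int) (hb : 0 < b) : PySem.Int.mod a b = a % b := by
  simp [PySem.Int.mod, Int.fmod_eq_emod]
  omega

theorem pv_fdiv_pos (a b : Int) (hb : 0 < b) : PySem.Int.floordiv a b = a / b := by
  simp [PySem.Int.floordiv, Int.fdiv_eq_ediv]
  omega

-- on an even num the loop never fires: an odd divisor with odd quotient would make num odd
theorem pvInnerA_even (num : Int) (hnum : num % 2 = 0) (i stop : Int) (hi : i % 2 = 1)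
    (hip : 0 < i) : pvInnerA num i stop = false := by
  rw [pvInnerA]
  split_ifs with h hc
  · exfalso
    obtain ⟨hm0, hq⟩ := hc
    rw [pv_mod_pos num i hip] at hm0
    rw [pv_fdiv_pos num i hip, pv_mod_pos _ 2 (by norm_num)] at hq
    have hqodd : (num / i) % 2 = 1 := by omega
    have hnumeq : num = i * (num / i) := by
      have : i ∣ num := Int.dvd_of_emod_eq_zero hm0
      exact (Int.mul_ediv_cancel' this).symm
    have : Odd num := by
      rw [hnumeq]
      exact (Int.odd_mul).mpr ⟨Int.odd_iff.mpr hi, Int.odd_iff.mpr hqodd⟩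
    rw [Int.odd_iff] at this
    omega
  · exact pvInnerA_even num hnum (i + 2) stop (by omega) (by omega)
  · rfl
termination_by (stop - i).toNat
decreasing_by omega

-- A's inner divisor search succeeds exactly when num is odd and num ≥ 3
theorem pvInnerA_eq (num : Int) :
    pvInnerA num 1 (PySem.Int.floordiv num 2 + 1)
      = (decide (3 ≤ num) && decide (PySem.Int.mod num 2 = 1)) := by
  have h2 : (0:Int) < 2 := by norm_num
  rw [pv_fdiv_pos num 2 h2]
  by_cases hodd : num % 2 = 1
  · by_cases h3 : 3 ≤ num
    · -- odd and ≥ 3: the very first candidate i = 1 fires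
      rw [pvInnerA, if_pos (by omega), if_pos]
      · simp [hodd, h3]
      · refine ⟨by simp [PySem.Int.mod], ?_⟩
        have : PySem.Int.floordiv num 1 = num := by simp [PySem.Int.floordiv]
        rw [this, pv_mod_pos num 2 h2]; omega
    · -- odd and < 3: num ≤ 1, the range is empty
      rw [pvInnerA, if_neg (by omega)]
      simp [hodd, h3]
  · -- even num: no odd divisor can have an odd quotient
    rw [pvInnerA_even num (by omega) 1 _ (by norm_num) (by norm_num)]
    simp [pv_mod_pos num 2 h2]
    omega

-- ===== VERDICT (by name: the statement is the Claim_ definition above) =====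
theorem find_product_of_two_odd_numbers_spec : Claim_equal_find_product_of_two_odd_numbers := by
  intro lst _
  unfold Spec_find_product_of_two_odd_numbers find_product_of_two_odd_numbers find_product_of_two_odd_numbers_alt
  have hfold : lst.foldl (fun acc num =>
      if pvInnerA num 1 (PySem.Int.floordiv num 2 + 1) then acc ++ [num] else acc) []
      = lst.filter (fun num => decide (3 ≤ num) && decide (PySem.Int.mod num 2 = 1)) := by
    have := PySem.List.foldl_append_if_eq_filter
      (p := fun num => pvInnerA num 1 (PySem.Int.floordiv num 2 + 1))
      (l := lst) (acc := ([] : List Int))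
    rw [this, List.nil_append]
    exact List.filter_congr (fun num _ => pvInnerA_eq num)
  simp only [hfold]
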